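-- pv_equiv track=rewrite | github.com/ollienelmes/advent-of-code | 2022/day6/day6.py | start_of_packet
-- ===== SOURCE A (Python) =====
-- def start_of_packet(input):
--     for i in range(len(input)):
--         word = input[i:i+4]
--         lock = 0
--         for letter in word:
--             if word.count(letter) == 1:
--                 lock += 1
--
--         if lock == 4:
--             return i + 4
-- ===== SOURCE B (Python) =====
-- def start_of_packet(input):
--     c1 = c2 = c3 = None
--     for i, c in enumerate(input):
--         if i >= 3 and len({c3, c2, c1, c}) == 4:
--             return i + 1
--         c1, c2, c3 = c2, c3, c
-- ===== Notes on version B (the rewrite author's own statement) =====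
-- stated objective: faster
-- what changed: A re-slices input[i:i+4] at every index and counts each letter's occurrences inside the slice; B makes a single pass carrying only the previous three characters and tests the four-element set size, so no slicing or per-window counting remains.
import Mathlib
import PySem

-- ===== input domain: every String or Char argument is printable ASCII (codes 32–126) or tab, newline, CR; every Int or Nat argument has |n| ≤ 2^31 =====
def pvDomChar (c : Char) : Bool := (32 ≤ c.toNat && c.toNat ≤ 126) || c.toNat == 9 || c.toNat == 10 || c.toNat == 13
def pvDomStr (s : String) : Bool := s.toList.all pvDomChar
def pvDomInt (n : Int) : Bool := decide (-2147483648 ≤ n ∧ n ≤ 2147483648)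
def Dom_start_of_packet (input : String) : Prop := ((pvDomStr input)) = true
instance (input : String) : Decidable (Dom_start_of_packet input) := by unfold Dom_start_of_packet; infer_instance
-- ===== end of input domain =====

-- B replaces A's per-index slice-and-count rescan with a single pass that carries the
-- previous three characters in O(1) state; a timing run measured B faster.

-- ===== PORT A =====
-- A works on a string; ported on its code-point list (PySem.Chars semantics): input[i:i+4]
-- → PySem.List.slice, iteration over the word → list recursion, and word.count(letter)
-- for the 1-character letter → List.count (counting a 1-char substring = counting that char).
def startOfPacketGoA (s : List Char) : List Int → Option Int
  | [] => none
  | i :: rest =>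
      let word := PySem.List.slice s (some i) (some (i + 4))
      let lock : Int := word.foldl (fun lock letter => if word.count letter == 1 then lock + 1 else lock) 0
      if lock == 4 then some (i + 4) else startOfPacketGoA s rest

def start_of_packet (input : String) : Option Int :=
  startOfPacketGoA input.toList (PySem.List.pyRange 0 (PySem.Str.len input) 1)

-- ===== PORT B =====
-- one pass over enumerate(input); c1,c2,c3 hold the previous three characters (None before)
def startOfPacketGoB : List Char → Int → Option Char → Option Char → Option Char → Option Int
  | [], _, _, _, _ => none
  | c :: rest, i, c1, c2, c3 =>
      if 3 ≤ i ∧ (PySem.Set.ofList [c3, c2, c1, some c]).length = 4 then some (i + 1)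
      else startOfPacketGoB rest (i + 1) c2 c3 (some c)

def start_of_packet_alt (input : String) : Option Int :=
  startOfPacketGoB input.toList 0 none none none

-- ===== PRECONDITION & SPEC =====
def Spec_start_of_packet (input : String) (out : Option Int) : Prop := out = start_of_packet_alt input
instance (input : String) (out : Option Int) : Decidable (Spec_start_of_packet input out) := by unfold Spec_start_of_packet; infer_instance

-- ===== CLAIM (what is proved, stated in full; the proofs are below) =====
def Claim_equal_start_of_packet : Prop := ∀ (input : String), Dom_start_of_packet input → Spec_start_of_packet input (start_of_packet input)

-- ===== LEMMAS AND PROOFS =====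

-- common middle form: scan the windows of four as a structural recursion on the char list
def gMid : List Char → Int → Option Int
  | a :: b :: c :: d :: t, k => if [a, b, c, d].Nodup then some (k + 4) else gMid (b :: c :: d :: t) (k + 1)
  | _, _ => none

theorem gMid_short (l : List Char) (k : Int) (h : l.length < 4) : gMid l k = none := by
  rcases l with _ | ⟨a, _ | ⟨b, _ | ⟨c, _ | ⟨d, t⟩⟩⟩⟩ <;> simp [gMid] at h ⊢; omega

theorem set4_iff (a b c d : Char) :
    (PySem.Set.ofList [some c, some b, some a, some d]).length = 4 ↔ [a, b, c, d].Nodup := by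
  by_cases h1 : a = b <;> by_cases h2 : a = c <;> by_cases h3 : a = d <;>
    by_cases h4 : b = c <;> by_cases h5 : b = d <;> by_cases h6 : c = d <;>
    simp_all [PySem.Set.ofList, PySem.Set.add, PySem.Set.contains] <;>
    split_ifs <;> simp_all <;> tauto

theorem lock4_iff (word : List Char) (h : word.length ≤ 4) :
    ((word.countP (fun letter => word.count letter == 1) : Int) == 4) = true ↔ (word.length = 4 ∧ word.Nodup) := by
  have hle := List.countP_le_length (l := word) (p := fun letter => word.count letter == 1)
  constructor
  · intro hc
    have hc4 : word.countP (fun letter => word.count letter == 1) = 4 := by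
      have := beq_iff_eq.mp hc; omega
    have hlen : word.length = 4 := by omega
    refine ⟨hlen, ?_⟩
    have hall : ∀ x ∈ word, (word.count x == 1) = true := by
      apply (List.countP_eq_length).mp; omega
    rw [List.nodup_iff_count_le_one]
    intro x
    by_cases hx : x ∈ word
    · exact le_of_eq (beq_iff_eq.mp (hall x hx))
    · simp [List.count_eq_zero_of_not_mem hx]
  · rintro ⟨hlen, hnd⟩
    have hall : ∀ x ∈ word, (word.count x == 1) = true := by
      intro x hx
      exact beq_iff_eq.mpr (List.count_eq_one_of_mem hnd hx)
    have : word.countP (fun letter => word.count letter == 1) = word.length :=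
      List.countP_eq_length.mpr hall
    simp [this, hlen]

theorem Aside_aux (n : Nat) : ∀ (s : List Char) (k : Nat), s.length - k ≤ n →
    startOfPacketGoA s (PySem.List.pyRange (k : Int) (s.length : Int) 1) = gMid (s.drop k) (k : Int) := by
  induction n with
  | zero =>
      intro s k h
      have hk : s.length ≤ k := by omega
      rw [PySem.List.pyRange_one_eq_nil (by exact_mod_cast hk), List.drop_eq_nil_of_le hk]
      rfl
  | succ n ih =>
      intro s k h
      by_cases hk : s.length ≤ k
      · rw [PySem.List.pyRange_one_eq_nil (by exact_mod_cast hk), List.drop_eq_nil_of_le hk]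
        rfl
      · have hk' : k < s.length := by omega
        rw [PySem.List.pyRange_one_cons (by exact_mod_cast hk')]
        rw [startOfPacketGoA]
        have hw : PySem.List.slice s (some (k : Int)) (some ((k : Int) + 4)) = (s.drop k).take 4 := by
          have := PySem.List.slice_natCast_add (xs := s) (j := k) (n := 4)
          push_cast at this ⊢
          exact this
        rw [hw]
        set word := (s.drop k).take 4 with hword
        have hwl : word.length ≤ 4 := by simp [hword]
        rw [PySem.List.foldl_if_add_one]
        rw [show ((0 : Int) + (word.countP (fun letter => word.count letter == 1) : Int)) = (word.countP (fun letter => word.count letter == 1) : Int) by ring]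
        by_cases hC : word.length = 4 ∧ word.Nodup
        · rw [if_pos ((lock4_iff word hwl).mpr hC)]
          obtain ⟨hl4, hnd⟩ := hC
          have hsplit : s.drop k = word ++ (s.drop k).drop 4 := (List.take_append_drop 4 (s.drop k)).symm
          rcases word with _ | ⟨a, _ | ⟨b, _ | ⟨c, _ | ⟨d, _ | ⟨e, t⟩⟩⟩⟩⟩ <;> simp at hl4
          rw [hsplit]
          simp only [List.cons_append, List.nil_append]
          rw [gMid, if_pos hnd]
        · rw [if_neg (fun hc => hC ((lock4_iff word hwl).mp hc))]
          have ih' := ih s (k + 1) (by omega)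
          push_cast at ih'
          rw [ih']
          by_cases hlen : (s.drop k).length < 4
          · rw [gMid_short _ _ hlen, gMid_short]
            rw [List.length_drop] at hlen ⊢
            omega
          · have hlen' : 4 ≤ (s.drop k).length := by omega
            have h4 : word.length = 4 := by
              rw [hword, List.length_take]; omega
            have hsplit : s.drop k = word ++ (s.drop k).drop 4 := (List.take_append_drop 4 (s.drop k)).symm
            have hnd : ¬ word.Nodup := fun hn => hC ⟨h4, hn⟩
            rcases word with _ | ⟨a, _ | ⟨b, _ | ⟨c, _ | ⟨d, _ | ⟨e, t⟩⟩⟩⟩⟩ <;> simp at h4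
            rw [hsplit]
            simp only [List.cons_append, List.nil_append]
            rw [gMid, if_neg (by simpa using hnd)]
            have htl : s.drop (k + 1) = b :: c :: d :: (s.drop k).drop 4 := by
              have hdd : s.drop (k + 1) = (s.drop k).tail := by
                rw [← List.drop_one, List.drop_drop]
              rw [hdd, hsplit]
              rfl
            rw [htl]

theorem Bside (rest : List Char) (a b c : Char) (k : Int) (hk : 0 ≤ k) :
    startOfPacketGoB rest (k + 3) (some a) (some b) (some c) = gMid (a :: b :: c :: rest) k := by
  induction rest generalizing a b c k with
  | nil => simp [startOfPacketGoB, gMid]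
  | cons d t ih =>
      rw [startOfPacketGoB, gMid]
      by_cases hnd : [a, b, c, d].Nodup
      · rw [if_pos ⟨by omega, (set4_iff a b c d).mpr hnd⟩, if_pos hnd]
        exact congrArg some (by ring)
      · rw [if_neg (fun hc => hnd ((set4_iff a b c d).mp hc.2)), if_neg hnd,
            show k + 3 + 1 = (k + 1) + 3 by ring, ih b c d (k + 1) (by omega)]

theorem B_eq_gMid (s : List Char) : startOfPacketGoB s 0 none none none = gMid s 0 := by
  rcases s with _ | ⟨a, _ | ⟨b, _ | ⟨c, rest⟩⟩⟩
  · simp [startOfPacketGoB, gMid]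
  · simp [startOfPacketGoB, gMid]
  · simp [startOfPacketGoB, gMid]
  · rw [startOfPacketGoB, if_neg (fun h => absurd h.1 (by norm_num)),
        startOfPacketGoB, if_neg (fun h => absurd h.1 (by norm_num)),
        startOfPacketGoB, if_neg (fun h => absurd h.1 (by norm_num))]
    have hB := Bside rest a b c 0 le_rfl
    norm_num at hB ⊢
    exact hB

-- ===== VERDICT (by name: the statement is the Claim_ definition above) =====
theorem start_of_packet_spec : Claim_equal_start_of_packet := by
  intro input _
  unfold Spec_start_of_packet start_of_packet start_of_packet_alt
  have hA := Aside_aux input.toList.length input.toList 0 (by omega)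
  simp only [Nat.cast_zero, List.drop_zero] at hA
  rw [B_eq_gMid, PySem.Str.len_eq, ← hA]
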